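-- pv_equiv track=rewrite | github.com/rafaelflores-nefadv/nef-controldesk-revobot-siscobra | src/core/download_api.py | _construir_path_info
-- ===== SOURCE A (Python) =====
-- def _construir_path_info(pasta_normalizada: str) -> list[dict]:
--     if not pasta_normalizada:
--         return []
--
--     acumulado = []
--     partes = [parte.strip() for parte in pasta_normalizada.split("\\") if parte.strip()]
--     for parte in partes:
--         if acumulado:
--             key = f"{acumulado[-1]['key']}\\{parte}"
--         else:
--             key = parte
--         acumulado.append({"key": key, "name": parte})
--     return acumulado
-- ===== SOURCE B (Python) =====
-- def _construir_path_info(pasta_normalizada: str) -> list[dict]: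
--     # B: compute each key directly as the "\"-join of the prefix of parts,
--     # instead of chaining off the previously built dict (simpler decomposition).
--     if not pasta_normalizada:
--         return []
--     partes = [p.strip() for p in pasta_normalizada.split("\\") if p.strip()]
--     return [{"key": "\\".join(partes[:i + 1]), "name": parte}
--             for i, parte in enumerate(partes)]
-- ===== Notes on version B (the rewrite author's own statement) =====
-- stated objective: simpler
-- what changed: Replaces the stateful accumulator loop (reading the previous dict's key to extend it) with a direct comprehension that recomputes each key as the backslash-join of the prefix partes[:i+1].
import Mathlib
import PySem

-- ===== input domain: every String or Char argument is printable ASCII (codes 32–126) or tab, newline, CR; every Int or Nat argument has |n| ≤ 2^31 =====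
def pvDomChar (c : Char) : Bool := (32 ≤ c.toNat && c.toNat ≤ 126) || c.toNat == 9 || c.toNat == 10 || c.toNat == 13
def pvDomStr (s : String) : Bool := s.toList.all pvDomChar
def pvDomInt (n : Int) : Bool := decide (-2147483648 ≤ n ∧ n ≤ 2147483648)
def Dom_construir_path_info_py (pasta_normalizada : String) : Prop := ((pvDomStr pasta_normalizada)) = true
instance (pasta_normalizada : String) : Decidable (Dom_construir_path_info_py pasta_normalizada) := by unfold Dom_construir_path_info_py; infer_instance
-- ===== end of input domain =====

-- B replaces A's accumulator loop (chaining off the previous dict's key) by a direct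
-- per-index recomputation: each key is the "\"-join of the prefix partes[:i+1] (simpler decomposition).

-- ===== PORT A =====
-- loop body of A; acumulado[-1]['key'] is Dict.get? on the last dict (defaults unreachable: the
-- guard ensures the list is nonempty and every appended dict carries "key")
def pvStepA (acumulado : List (List (String × String))) (parte : String) : List (List (String × String)) :=
  let key := if acumulado ≠ [] then
      ((PySem.Dict.get? (PySem.Dict.mk ((PySem.List.pyGet? acumulado (-1)).getD [])) "key").getD "") ++ "\\" ++ parte
    else parte
  acumulado ++ [[("key", key), ("name", parte)]]

def construir_path_info_py (pasta_normalizada : String) : List (List (String × String)) :=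
  if pasta_normalizada = "" then []
  else
    let partes := (((PySem.Str.split? pasta_normalizada "\\").getD []).filter
        (fun p => PySem.Str.strip p ≠ "")).map PySem.Str.strip
    partes.foldl pvStepA []

-- ===== PORT B =====
def construir_path_info_py_alt (pasta_normalizada : String) : List (List (String × String)) :=
  if pasta_normalizada = "" then []
  else
    let partes := (((PySem.Str.split? pasta_normalizada "\\").getD []).filter
        (fun p => PySem.Str.strip p ≠ "")).map PySem.Str.strip
    (PySem.List.enumerate partes 0).map (fun ip =>
      [("key", PySem.Str.join "\\" (PySem.List.slice partes none (some (ip.1 + 1)))),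
       ("name", ip.2)])

-- ===== PRECONDITION & SPEC =====
def Spec_construir_path_info_py (pasta_normalizada : String) (out : List (List (String × String))) : Prop := out = construir_path_info_py_alt pasta_normalizada
instance (pasta_normalizada : String) (out : List (List (String × String))) : Decidable (Spec_construir_path_info_py pasta_normalizada out) := by unfold Spec_construir_path_info_py; infer_instance

-- ===== CLAIM (what is proved, stated in full; the proofs are below) =====
def Claim_equal_construir_path_info_py : Prop := ∀ (pasta_normalizada : String), Dom_construir_path_info_py pasta_normalizada → Spec_construir_path_info_py pasta_normalizada (construir_path_info_py pasta_normalizada)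

-- ===== LEMMAS AND PROOFS =====

-- common form both sides are reduced to: chain keys off the carried key string
def pvGo (k : String) : List String → List (List (String × String))
  | [] => []
  | p :: rest => [("key", k ++ "\\" ++ p), ("name", p)] :: pvGo (k ++ "\\" ++ p) rest

theorem pvChars_join_snoc (sep q : List Char) : ∀ (l : List (List Char)), l ≠ [] →
    PySem.Chars.join sep (l ++ [q]) = PySem.Chars.join sep l ++ sep ++ q
  | [], h => absurd rfl h
  | [p], _ => by
      simp [PySem.Chars.join_cons_cons, PySem.Chars.join_singleton]
  | p :: p' :: l, _ => by
      have ih := pvChars_join_snoc sep q (p' :: l) (by simp)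
      show PySem.Chars.join sep (p :: p' :: (l ++ [q])) = _
      rw [PySem.Chars.join_cons_cons, show (p' : List Char) :: (l ++ [q]) = (p' :: l) ++ [q] from rfl,
        ih, PySem.Chars.join_cons_cons]
      simp [List.append_assoc]

theorem pvJoin_snoc (pre : List String) (q : String) (h : pre ≠ []) :
    PySem.Str.join "\\" (pre ++ [q]) = PySem.Str.join "\\" pre ++ "\\" ++ q := by
  apply String.toList_inj.mp
  simp only [PySem.Str.toList_join, String.toList_append, List.map_append, List.map_cons,
    List.map_nil]
  rw [pvChars_join_snoc _ _ _ (by simpa using h)]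

theorem pvJoin_singleton (p : String) : PySem.Str.join "\\" [p] = p := by
  apply String.toList_inj.mp
  simp [PySem.Str.toList_join, PySem.Chars.join_singleton]

theorem pvFoldA (rest : List String) : ∀ (acc : List (List (String × String))) (k : String),
    acc ≠ [] →
    (PySem.Dict.get? (PySem.Dict.mk ((PySem.List.pyGet? acc (-1)).getD [])) "key").getD "" = k →
    rest.foldl pvStepA acc = acc ++ pvGo k rest := by
  induction rest with
  | nil => intro acc k _ _; simp [pvGo]
  | cons p rest ih =>
    intro acc k hacc hk
    rw [List.foldl_cons]
    have hstep : pvStepA acc p = acc ++ [[("key", k ++ "\\" ++ p), ("name", p)]] := by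
      simp [pvStepA, hacc, hk]
    rw [hstep, ih (acc ++ [[("key", k ++ "\\" ++ p), ("name", p)]]) (k ++ "\\" ++ p) (by simp)
      (by rw [PySem.List.pyGet?_neg_one_append_singleton]; rfl)]
    simp [pvGo]

theorem pvMapB (rest : List String) : ∀ (pre : List String), pre ≠ [] →
    (PySem.List.enumerate rest (pre.length : Int)).map (fun ip =>
      [("key", PySem.Str.join "\\" (PySem.List.slice (pre ++ rest) none (some (ip.1 + 1)))),
       ("name", ip.2)]) = pvGo (PySem.Str.join "\\" pre) rest := by
  induction rest with
  | nil => intro pre _; simp [PySem.List.enumerate, pvGo]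
  | cons q rest ih =>
    intro pre hpre
    rw [PySem.List.enumerate_cons, List.map_cons]
    have hb : (0:Int) ≤ (pre.length : Int) + 1 := by positivity
    have htake : PySem.List.slice (pre ++ q :: rest) none (some ((pre.length : Int) + 1))
        = pre ++ [q] := by
      rw [PySem.List.slice_to _ hb]
      have : ((pre.length : Int) + 1).toNat = pre.length + 1 := by omega
      rw [this, ← List.singleton_append, ← List.append_assoc,
        List.take_append_of_le_length (by simp)]
      simp
    rw [htake, pvJoin_snoc pre q hpre]
    have ih' := ih (pre ++ [q]) (by simp)
    simp only [List.length_append, List.length_cons, List.length_nil, Nat.cast_add,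
      Nat.cast_one, List.append_assoc, List.singleton_append] at ih'
    norm_num at ih'
    rw [ih', pvJoin_snoc pre q hpre, pvGo]

theorem pvMain (partes : List String) :
    partes.foldl pvStepA []
    = (PySem.List.enumerate partes 0).map (fun ip =>
      [("key", PySem.Str.join "\\" (PySem.List.slice partes none (some (ip.1 + 1)))),
       ("name", ip.2)]) := by
  cases partes with
  | nil => simp [PySem.List.enumerate]
  | cons p rest =>
    -- A side
    rw [List.foldl_cons]
    have hstep : pvStepA [] p = [[("key", p), ("name", p)]] := by simp [pvStepA]
    rw [hstep, pvFoldA rest [[("key", p), ("name", p)]] p (by simp) (by rfl)]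
    -- B side
    rw [PySem.List.enumerate_cons, List.map_cons]
    have h1 : PySem.List.slice (p :: rest) none (some ((0:Int) + 1)) = [p] := by
      rw [PySem.List.slice_to _ (by norm_num)]
      rfl
    rw [h1, pvJoin_singleton]
    have hmb := pvMapB rest [p] (by simp)
    simp only [List.length_cons, List.length_nil, List.singleton_append,
      pvJoin_singleton] at hmb
    norm_num at hmb
    simp only [zero_add]
    rw [hmb]
    simp

-- ===== VERDICT (by name: the statement is the Claim_ definition above) =====
theorem construir_path_info_py_spec : Claim_equal_construir_path_info_py := by
  intro pasta _
  unfold Spec_construir_path_info_py construir_path_info_py construir_path_info_py_alt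
  split
  · rfl
  · exact pvMain _
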